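-- pv_equiv track=rewrite | github.com/FeiYin99/COGS-108-Final-Project | util_catalog.py | parse_prereq
-- ===== SOURCE A (Python) =====
-- def parse_prereq(prereq_str):
--     """
--     Parses prerequisite string into list of courses
--     """
--     # TODO: Fix distinguishing things like MATH 31AH (which is right) and COGS 14AB (which is wrong)
--     punctuations = '''!()-[]{};:'"\,<>./?@#$%^&*_~'''
--     strings_to_remove = ["PNP", "P/NP", "GPA", "May", "Recommend", "Cognitive Science Honors Program"]
--
--     for x in strings_to_remove:
--         prereq_str = prereq_str.replace(x, "")
--
--     for x in prereq_str:
--         if x in punctuations or x.islower():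
--             prereq_str = prereq_str.replace(x, "")
--
--     prereq_list = []
--     prereq_index_list = [0]
--
--     for i in range(1, len(prereq_str)):
--         if prereq_str[i].isalpha() and prereq_str[i - 1] == " ":
--             prereq_index_list.append(i)
--
--     for i in range(len(prereq_index_list)):
--
--         if i == len(prereq_index_list) - 1:
--             prereq = prereq_str[prereq_index_list[i]:].rstrip()
--         else:
--             prereq = prereq_str[prereq_index_list[i]: prereq_index_list[i + 1]].rstrip()
--
--         if len(prereq) >= 4:
--             prereq_list.append(prereq)
--
--     prereq_str = prereq_list
--
--     return prereq_str
-- ===== SOURCE B (Python) =====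
-- def parse_prereq(prereq_str):
--     """
--     Parses prerequisite string into list of courses.
--     Single streaming pass over the cleaned string instead of building an
--     index list and slicing between indices.
--     """
--     punctuations = set('''!()-[]{};:'"\,<>./?@#$%^&*_~''')
--     for x in ["PNP", "P/NP", "GPA", "May", "Recommend", "Cognitive Science Honors Program"]:
--         prereq_str = prereq_str.replace(x, "")
--
--     s = ''.join(c for c in prereq_str if c not in punctuations and not c.islower())
--
--     prereq_list = []
--     start = 0
--     for i in range(1, len(s)):
--         if s[i].isalpha() and s[i - 1] == ' ':
--             seg = s[start:i].rstrip()
--             if len(seg) >= 4: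
--                 prereq_list.append(seg)
--             start = i
--     seg = s[start:].rstrip()
--     if len(seg) >= 4:
--         prereq_list.append(seg)
--     return prereq_list
-- ===== Notes on version B (the rewrite author's own statement) =====
-- stated objective: simpler
-- what changed: The two-phase segmentation (build a boundary-index list, then slice between consecutive indices) is replaced by a single streaming pass with a start pointer that emits each segment at its boundary, and the repeated str.replace character deletion is replaced by one filter pass.
import Mathlib
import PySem

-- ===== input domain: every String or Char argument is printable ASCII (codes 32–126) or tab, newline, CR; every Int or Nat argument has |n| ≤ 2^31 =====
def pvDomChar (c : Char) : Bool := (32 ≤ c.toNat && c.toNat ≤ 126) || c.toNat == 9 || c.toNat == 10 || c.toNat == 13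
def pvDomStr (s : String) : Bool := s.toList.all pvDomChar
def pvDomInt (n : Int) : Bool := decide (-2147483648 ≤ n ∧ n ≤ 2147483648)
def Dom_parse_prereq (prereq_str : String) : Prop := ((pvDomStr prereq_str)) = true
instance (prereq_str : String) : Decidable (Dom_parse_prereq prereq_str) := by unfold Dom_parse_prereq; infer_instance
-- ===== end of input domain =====

-- B replaces A's two-phase "build an index list, then slice between indices" with a single
-- streaming pass keeping only a start pointer (objective: simpler), and A's repeated
-- str.replace character deletion with one filter.

-- ===== PORT A =====
def parse_prereq (prereq_str : String) : List String :=
  let punctuations : List Char := "!()-[]{};:'\"\\,<>./?@#$%^&*_~".toList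
  let strings_to_remove : List String :=
    ["PNP", "P/NP", "GPA", "May", "Recommend", "Cognitive Science Honors Program"]
  -- for x in strings_to_remove: prereq_str = prereq_str.replace(x, "")
  let s1 : String := strings_to_remove.foldl (fun acc x => PySem.Str.replace acc x "") prereq_str
  -- for x in prereq_str: … (the iterator walks the snapshot while the name is rebound)
  let s2 : List Char := s1.toList.foldl
    (fun acc x =>
      if PySem.Chars.isIn [x] punctuations || PySem.Chars.islower x
      then PySem.Chars.replace acc [x] [] else acc) s1.toList
  let prereq_index_list : List Int := (PySem.List.pyRange 1 (s2.length : Int) 1).foldl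
    (fun acc i =>
      if PySem.Chars.isalpha (PySem.List.pyGetD s2 i ' ')
         && (PySem.List.pyGetD s2 (i - 1) ' ' == ' ')
      then acc ++ [i] else acc) [(0 : Int)]
  (PySem.List.pyRange 0 (prereq_index_list.length : Int) 1).foldl
    (fun acc i =>
      let prereq : List Char :=
        if i == (prereq_index_list.length : Int) - 1 then
          PySem.Chars.rstrip (PySem.List.slice s2 (some (PySem.List.pyGetD prereq_index_list i 0)) none)
        else
          PySem.Chars.rstrip (PySem.List.slice s2 (some (PySem.List.pyGetD prereq_index_list i 0))
            (some (PySem.List.pyGetD prereq_index_list (i + 1) 0)))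
      if 4 ≤ prereq.length then acc ++ [String.mk prereq] else acc) []

-- ===== PORT B =====
-- one streaming pass: emit a segment at every boundary, keep only a start pointer
def pvScanB (cs : List Char) (i start : Nat) (acc : List String) : List String :=
  if h : i < cs.length then
    if PySem.Chars.isalpha cs[i] && (cs[i-1]'(Nat.lt_of_le_of_lt (Nat.sub_le i 1) h) == ' ') then
      let seg := PySem.Chars.rstrip ((cs.drop start).take (i - start))
      pvScanB cs (i+1) i (if 4 ≤ seg.length then acc ++ [String.mk seg] else acc)
    else pvScanB cs (i+1) start acc
  else
    let seg := PySem.Chars.rstrip (cs.drop start)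
    if 4 ≤ seg.length then acc ++ [String.mk seg] else acc
termination_by cs.length - i

def parse_prereq_alt (prereq_str : String) : List String :=
  let punctuations := PySem.Set.ofList "!()-[]{};:'\"\\,<>./?@#$%^&*_~".toList
  let s1 : String := (["PNP", "P/NP", "GPA", "May", "Recommend", "Cognitive Science Honors Program"]
      : List String).foldl (fun acc x => PySem.Str.replace acc x "") prereq_str
  let s : List Char := s1.toList.filter
    (fun c => !(PySem.Set.contains punctuations c) && !(PySem.Chars.islower c))
  pvScanB s 1 0 []

-- ===== PRECONDITION & SPEC =====
def Spec_parse_prereq (prereq_str : String) (out : List String) : Prop := out = parse_prereq_alt prereq_str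
instance (prereq_str : String) (out : List String) : Decidable (Spec_parse_prereq prereq_str out) := by unfold Spec_parse_prereq; infer_instance

-- ===== CLAIM (what is proved, stated in full; the proofs are below) =====
def Claim_equal_parse_prereq : Prop := ∀ (prereq_str : String), Dom_parse_prereq prereq_str → Spec_parse_prereq prereq_str (parse_prereq prereq_str)

-- ===== LEMMAS AND PROOFS =====

-- segment spec: the pieces cut between consecutive boundary indices
def pvSegs (cs : List Char) (j : Int) : List Int → List String
  | [] =>
      let seg := PySem.Chars.rstrip (PySem.List.slice cs (some j) none)
      if 4 ≤ seg.length then [String.mk seg] else []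
  | k :: rest =>
      (let seg := PySem.Chars.rstrip (PySem.List.slice cs (some j) (some k))
       if 4 ≤ seg.length then [String.mk seg] else []) ++ pvSegs cs k rest

-- the boundary test of both programs
def pvBnd (cs : List Char) (i : Int) : Bool :=
  PySem.Chars.isalpha (PySem.List.pyGetD cs i ' ')
    && (PySem.List.pyGetD cs (i - 1) ' ' == ' ')

-- the body of A's second loop, named for the proofs
def pvBodyA (cs : List Char) (idxs : List Int) (acc : List String) (i : Int) : List String :=
  let prereq : List Char :=
    if i == (idxs.length : Int) - 1 then
      PySem.Chars.rstrip (PySem.List.slice cs (some (PySem.List.pyGetD idxs i 0)) none)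
    else
      PySem.Chars.rstrip (PySem.List.slice cs (some (PySem.List.pyGetD idxs i 0))
        (some (PySem.List.pyGetD idxs (i + 1) 0)))
  if 4 ≤ prereq.length then acc ++ [String.mk prereq] else acc

theorem pv_if_append {c : Prop} [Decidable c] (a : List String) (x : String) :
    (if c then a ++ [x] else a) = a ++ (if c then [x] else []) := by
  split <;> simp

-- replace(acc, x, "") for a single character removes every occurrence
theorem pv_replace_go (x : Char) :
    ∀ (fuel : Nat) (l acc : List Char), l.length ≤ fuel →
      PySem.Chars.replace.go [x] [] fuel l acc
        = acc.reverse ++ l.filter (fun c => !(c == x)) := by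
  intro fuel
  induction fuel with
  | zero => intro l acc h; simp at h; subst h; simp [PySem.Chars.replace.go]
  | succ n ih =>
    intro l acc h
    cases l with
    | nil => simp [PySem.Chars.replace.go]
    | cons c t =>
      simp only [PySem.Chars.replace.go]
      by_cases hx : x = c
      · subst hx
        simp only [List.isPrefixOf, beq_self_eq_true, List.isPrefixOf_nil_left, Bool.and_true,
          if_true, List.reverse_nil, List.nil_append]
        rw [show List.drop [x].length (x :: t) = t from rfl]
        rw [ih t acc (by simpa using h)]
        simp
      · have hbx : (x == c) = false := by simp [hx]
        simp only [List.isPrefixOf, hbx, Bool.false_and, Bool.false_eq_true, if_false]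
        rw [ih t (c :: acc) (by simpa using h)]
        simp [Ne.symm hx]

theorem pv_replace_single (x : Char) (s : List Char) :
    PySem.Chars.replace s [x] [] = s.filter (fun c => !(c == x)) := by
  simp only [PySem.Chars.replace, List.isEmpty_cons]
  simpa using pv_replace_go x s.length s [] le_rfl

-- folding single-character removals over a list of characters is a filter
theorem pv_fold_remove (bad : Char → Bool) :
    ∀ (L S : List Char),
      L.foldl (fun acc x => if bad x then PySem.Chars.replace acc [x] [] else acc) S
        = S.filter (fun c => !(bad c && L.contains c)) := by
  intro L
  induction L with
  | nil => intro S; simp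
  | cons c t ih =>
    intro S
    simp only [List.foldl_cons]
    by_cases hc : bad c = true
    · rw [if_pos hc, pv_replace_single, ih, List.filter_filter]
      apply List.filter_congr
      intro d _
      by_cases hdc : d = c
      · subst hdc; simp [hc]
      · simp [hdc]
    · rw [if_neg (by simp_all), ih]
      apply List.filter_congr
      intro d _
      by_cases hdc : d = c
      · subst hdc; simp [Bool.not_eq_true] at hc; simp [hc]
      · simp [hdc]

theorem pv_singleton_infix {c : Char} {P : List Char} : [c] <:+: P ↔ c ∈ P := by
  constructor
  · rintro ⟨s, t, rfl⟩; simp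
  · intro h
    obtain ⟨s, t, rfl⟩ := List.append_of_mem h
    exact ⟨s, t, by simp⟩

-- A's character-deletion loop produces exactly B's filter
theorem pv_clean_eq (punct : List Char) (S : List Char) :
    S.foldl (fun acc x =>
        if PySem.Chars.isIn [x] punct || PySem.Chars.islower x
        then PySem.Chars.replace acc [x] [] else acc) S
      = S.filter (fun c => !(PySem.Set.contains (PySem.Set.ofList punct) c)
                            && !(PySem.Chars.islower c)) := by
  rw [pv_fold_remove (fun x => PySem.Chars.isIn [x] punct || PySem.Chars.islower x) S S]
  apply List.filter_congr
  intro c hc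
  have hmem : S.contains c = true := by simpa using hc
  have hiso : PySem.Chars.isIn [c] punct = punct.contains c := by
    by_cases h : c ∈ punct
    · simp only [List.contains_eq_mem, h, decide_true]
      exact (PySem.Chars.isIn_iff_infix _ _).2 (pv_singleton_infix.2 h)
    · simp only [List.contains_eq_mem, h, decide_false]
      exact (PySem.Chars.isIn_eq_false_iff _ _).2 (fun hin => h (pv_singleton_infix.1 hin))
  have hset : PySem.Set.contains (PySem.Set.ofList punct) c = punct.contains c := by
    by_cases h : c ∈ punct
    · simp [PySem.Set.contains_iff, PySem.Set.mem_ofList, h]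
    · simp [PySem.Set.contains_iff, PySem.Set.mem_ofList, h]
  rw [hmem, hiso, hset]
  cases hcp : punct.contains c <;> cases hl : PySem.Chars.islower c <;> simp

-- index shift: dropping the head of the index list shifts A's loop body by one
theorem pv_shiftA (cs : List Char) (x : Int) (tl : List Int) (i : Nat) (a : List String) :
    pvBodyA cs (x :: tl) a ((i : Int) + 1) = pvBodyA cs tl a (i : Int) := by
  simp only [pvBodyA]
  have h1 : PySem.List.pyGetD (x :: tl) ((i : Int) + 1) 0 = PySem.List.pyGetD tl (i : Int) 0 := by
    rw [show ((i : Int) + 1) = (((i + 1 : Nat)) : Int) by push_cast; ring]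
    rw [PySem.List.pyGetD_natCast, PySem.List.pyGetD_natCast, List.getD_cons_succ]
  have h2 : PySem.List.pyGetD (x :: tl) ((i : Int) + 1 + 1) 0
      = PySem.List.pyGetD tl ((i : Int) + 1) 0 := by
    rw [show ((i : Int) + 1 + 1) = (((i + 2 : Nat)) : Int) by push_cast; ring,
        show ((i : Int) + 1) = (((i + 1 : Nat)) : Int) by push_cast; ring]
    rw [PySem.List.pyGetD_natCast, PySem.List.pyGetD_natCast]
    rw [show ((i + 2 : Nat)) = (i + 1) + 1 from rfl, List.getD_cons_succ]
  have h3 : (((i : Int) + 1) == ((x :: tl).length : Int) - 1)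
      = ((i : Int) == (tl.length : Int) - 1) := by
    rw [Bool.eq_iff_iff]
    simp only [beq_iff_eq, List.length_cons]
    push_cast
    omega
  rw [h1, h2, h3]

-- A's second loop (index arithmetic over the index list) computes pvSegs
theorem pv_loopA (cs : List Char) :
    ∀ (rest : List Int) (j : Int) (acc : List String),
      (PySem.List.pyRange 0 (((j :: rest).length : Nat) : Int) 1).foldl
        (pvBodyA cs (j :: rest)) acc
      = acc ++ pvSegs cs j rest := by
  intro rest
  induction rest with
  | nil =>
    intro j acc
    rw [show ((([j] : List Int).length : Nat) : Int) = 1 from rfl]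
    rw [show PySem.List.pyRange 0 1 1 = [(0 : Int)] from PySem.List.pyRange_one_singleton 0]
    simp only [List.foldl_cons, List.foldl_nil, pvBodyA, pvSegs]
    rw [show (((0 : Int)) == ((([j] : List Int).length : Nat) : Int) - 1) = true by simp]
    simp only [if_true, PySem.List.pyGetD_zero_cons]
    rw [pv_if_append]
  | cons k rest' ih =>
    intro j acc
    have hn : (((j :: k :: rest').length : Nat) : Int) = ((rest'.length : Int) + 2) := by
      push_cast [List.length_cons]; ring
    rw [hn, PySem.List.pyRange_one_cons (by omega)]
    simp only [List.foldl_cons]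
    have hfirst : pvBodyA cs (j :: k :: rest') acc 0
        = acc ++ (if 4 ≤ (PySem.Chars.rstrip (PySem.List.slice cs (some j) (some k))).length
                  then [String.mk (PySem.Chars.rstrip (PySem.List.slice cs (some j) (some k)))]
                  else []) := by
      simp only [pvBodyA]
      rw [show (((0 : Int)) == (((j :: k :: rest').length : Nat) : Int) - 1) = false by
        rw [Bool.eq_false_iff]; simp only [ne_eq, beq_iff_eq]; push_cast; omega]
      simp only [Bool.false_eq_true, if_false, PySem.List.pyGetD_zero_cons, zero_add]
      rw [show ((1 : Int)) = (((1 : Nat)) : Int) from rfl, PySem.List.pyGetD_natCast]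
      rw [show List.getD (j :: k :: rest') 1 0 = k from rfl]
      rw [pv_if_append]
    rw [hfirst]
    set acc' : List String := acc ++ (if 4 ≤ (PySem.Chars.rstrip (PySem.List.slice cs (some j) (some k))).length
                  then [String.mk (PySem.Chars.rstrip (PySem.List.slice cs (some j) (some k)))]
                  else []) with hacc'
    set R : List Int := (List.range (rest'.length + 1)).map (fun a => ((a : Nat) : Int)) with hR
    have hrange : PySem.List.pyRange (0 + 1) ((rest'.length : Int) + 2) 1
        = R.map (fun y => (1 : Int) + y) := by
      rw [zero_add, PySem.List.pyRange_one, hR, List.map_map]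
      rw [show ((rest'.length : Int) + 2 - 1).toNat = rest'.length + 1 by omega]
      rfl
    rw [hrange, List.foldl_map]
    have hIH := ih k acc'
    rw [show ((((k :: rest') : List Int).length : Nat) : Int) = ((rest'.length : Int) + 1) by
          push_cast [List.length_cons]; ring,
        PySem.List.pyRange_one] at hIH
    simp only [sub_zero, zero_add] at hIH
    rw [show ((rest'.length : Int) + 1).toNat = rest'.length + 1 by omega] at hIH
    rw [show (List.range (rest'.length + 1)).map (fun a => ((a : Nat) : Int)) = R from hR.symm] at hIH
    have hcongr : R.foldl (fun x y => pvBodyA cs (j :: k :: rest') x (1 + y)) acc'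
        = R.foldl (pvBodyA cs (k :: rest')) acc' := by
      apply PySem.List.foldl_congr_mem
      intro a y hy
      rw [hR] at hy
      simp only [List.mem_map, List.mem_range] at hy
      obtain ⟨b, _, rfl⟩ := hy
      rw [add_comm, pv_shiftA]
    rw [hcongr, hIH, pvSegs, List.append_assoc]

-- B's streaming scan computes pvSegs over the remaining boundaries
theorem pv_scanB (cs : List Char) :
    ∀ (m i start : Nat) (acc : List String), cs.length - i ≤ m → 1 ≤ i →
      pvScanB cs i start acc
        = acc ++ pvSegs cs (start : Int)
            ((PySem.List.pyRange (i : Int) (cs.length : Int) 1).filter (pvBnd cs)) := by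
  intro m
  induction m with
  | zero =>
    intro i start acc hm hi
    have hin : ¬ (i < cs.length) := by omega
    rw [pvScanB, dif_neg hin]
    rw [PySem.List.pyRange_one_eq_nil (by omega)]
    simp only [List.filter_nil, pvSegs]
    rw [PySem.List.slice_from_natCast, pv_if_append]
  | succ n ih =>
    intro i start acc hm hi
    by_cases hin : i < cs.length
    · rw [pvScanB, dif_pos hin]
      have hbnd : (PySem.Chars.isalpha cs[i]
          && (cs[i-1]'(Nat.lt_of_le_of_lt (Nat.sub_le i 1) hin) == ' ')) = pvBnd cs (i : Int) := by
        simp only [pvBnd, PySem.List.pyGetD_natCast,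
          show ((i : Int) - 1) = (((i - 1 : Nat)) : Int) by omega]
        rw [List.getD_eq_getElem cs ' ' hin,
            List.getD_eq_getElem cs ' ' (show i - 1 < cs.length by omega)]
      rw [PySem.List.pyRange_one_cons (by simp; omega), List.filter_cons]
      by_cases ht : pvBnd cs (i : Int) = true
      · rw [hbnd, ht]
        simp only [if_true]
        rw [ih (i + 1) i _ (by omega) (by omega)]
        simp only [pvSegs, PySem.List.slice_natCast]
        rw [show ((i : Int) + 1) = (((i + 1 : Nat)) : Int) by push_cast; ring]
        rw [pv_if_append, List.append_assoc]
      · have ht' : pvBnd cs (i : Int) = false := by simpa using ht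
        rw [hbnd, ht']
        simp only [Bool.false_eq_true, if_false]
        rw [ih (i + 1) start acc (by omega) (by omega)]
        rw [show ((i : Int) + 1) = (((i + 1 : Nat)) : Int) by push_cast; ring]
    · rw [pvScanB, dif_neg hin]
      rw [PySem.List.pyRange_one_eq_nil (by omega)]
      simp only [List.filter_nil, pvSegs]
      rw [PySem.List.slice_from_natCast, pv_if_append]

-- ===== VERDICT (by name: the statement is the Claim_ definition above) =====
set_option maxHeartbeats 1000000 in
theorem parse_prereq_spec : Claim_equal_parse_prereq := by
  intro s _
  unfold Spec_parse_prereq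
  simp only [parse_prereq, parse_prereq_alt]
  set P : List Char := "!()-[]{};:'\"\\,<>./?@#$%^&*_~".toList with hP
  set s1 : String := (["PNP", "P/NP", "GPA", "May", "Recommend",
      "Cognitive Science Honors Program"] : List String).foldl
      (fun acc x => PySem.Str.replace acc x "") s with hs1
  rw [pv_clean_eq P s1.toList]
  set cs : List Char := s1.toList.filter
    (fun c => !(PySem.Set.contains (PySem.Set.ofList P) c) && !(PySem.Chars.islower c)) with hcs
  clear_value cs
  clear_value P s1
  rw [show (fun (acc : List Int) (i : Int) =>
        if PySem.Chars.isalpha (PySem.List.pyGetD cs i ' ')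
           && (PySem.List.pyGetD cs (i - 1) ' ' == ' ')
        then acc ++ [i] else acc)
      = (fun (acc : List Int) (i : Int) => if pvBnd cs i then acc ++ [i] else acc) from rfl]
  rw [PySem.List.foldl_append_if_eq_filter (pvBnd cs)]
  set bs : List Int := (PySem.List.pyRange 1 (cs.length : Int) 1).filter (pvBnd cs) with hbs
  clear_value bs
  rw [show ([(0 : Int)] ++ bs) = ((0 : Int) :: bs) from rfl]
  rw [show (fun (acc : List String) (i : Int) =>
        let prereq : List Char :=
          if i == (((0 : Int) :: bs).length : Int) - 1 then
            PySem.Chars.rstrip (PySem.List.slice cs (some (PySem.List.pyGetD ((0 : Int) :: bs) i 0)) none)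
          else
            PySem.Chars.rstrip (PySem.List.slice cs (some (PySem.List.pyGetD ((0 : Int) :: bs) i 0))
              (some (PySem.List.pyGetD ((0 : Int) :: bs) (i + 1) 0)))
        if 4 ≤ prereq.length then acc ++ [String.mk prereq] else acc)
      = pvBodyA cs ((0 : Int) :: bs) from rfl]
  rw [pv_loopA cs bs 0 []]
  rw [pv_scanB cs cs.length 1 0 [] (by omega) le_rfl]
  simp only [Nat.cast_one, Nat.cast_zero, List.nil_append]
  rw [← hbs]
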